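-- pv_equiv track=rewrite | github.com/vrolse/aq2replay | web/db.py | _build_round_intervals
-- ===== SOURCE A (Python) =====
-- def _build_round_intervals(data: dict, frame_count: int) -> list:
--     """Return deterministic [(round_index, start_frame, end_frame), ...]."""
--     starts = data.get('round_start_frames') or []
--     clean = sorted({
--         int(v) for v in starts
--         if isinstance(v, int) or (isinstance(v, str) and str(v).isdigit())
--     })
--     boundaries = [0]
--     boundaries.extend(v for v in clean if 0 < v < frame_count)
--     boundaries.append(frame_count)
--     # Deduplicate while preserving order.
--     uniq = []
--     for v in boundaries:
--         if not uniq or uniq[-1] != v: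
--             uniq.append(v)
--     intervals = []
--     for idx in range(len(uniq) - 1):
--         start_f = int(uniq[idx])
--         end_f = int(uniq[idx + 1])
--         if end_f <= start_f:
--             continue
--         intervals.append((len(intervals) + 1, start_f, end_f))
--     if not intervals:
--         intervals.append((1, 0, frame_count))
--     return intervals
-- ===== SOURCE B (Python) =====
-- def _build_round_intervals(data: dict, frame_count: int) -> list:
--     """Return deterministic [(round_index, start_frame, end_frame), ...]."""
--     starts = data.get('round_start_frames') or []
--     clean = sorted({
--         int(v) for v in starts
--         if isinstance(v, int) or (isinstance(v, str) and str(v).isdigit())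
--     })
--     intervals = []
--     prev = 0
--     for v in clean:
--         if 0 < v < frame_count:
--             intervals.append((len(intervals) + 1, prev, v))
--             prev = v
--     if frame_count > prev:
--         intervals.append((len(intervals) + 1, prev, frame_count))
--     if not intervals:
--         intervals.append((1, 0, frame_count))
--     return intervals
-- ===== Notes on version B (the rewrite author's own statement) =====
-- stated objective: simpler
-- what changed: Replaces A's three materialized passes (boundary list construction, adjacency-dedup list, index-based pairwise scan over uniq) with one accumulating pass over the sorted starts that maintains a running previous boundary and appends each interval directly.
import Mathlib
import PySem

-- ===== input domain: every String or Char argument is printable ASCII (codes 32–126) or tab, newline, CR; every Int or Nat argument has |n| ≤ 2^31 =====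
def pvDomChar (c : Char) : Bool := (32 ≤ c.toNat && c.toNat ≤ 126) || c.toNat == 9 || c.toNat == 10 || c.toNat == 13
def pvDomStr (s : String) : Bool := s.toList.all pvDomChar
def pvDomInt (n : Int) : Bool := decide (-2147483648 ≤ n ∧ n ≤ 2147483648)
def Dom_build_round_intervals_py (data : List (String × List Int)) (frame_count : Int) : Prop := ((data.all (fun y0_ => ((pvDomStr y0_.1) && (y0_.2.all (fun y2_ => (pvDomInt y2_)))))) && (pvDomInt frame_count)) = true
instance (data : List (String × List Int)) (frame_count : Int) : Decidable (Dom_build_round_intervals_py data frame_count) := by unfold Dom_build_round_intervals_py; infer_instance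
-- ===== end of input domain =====

-- B replaces A's three materialized passes (boundaries, adjacency-dedup, index pairwise scan)
-- with one accumulating pass over the sorted starts keeping a running previous boundary; same results.


-- ===== PORT A =====
-- literal transliteration of A; the values are all ints here, so the isinstance/int(v)
-- filter of the set comprehension keeps every element (exact on this typed domain)
def build_round_intervals_py (data : List (String × List Int)) (frame_count : Int) : List (Int × Int × Int) :=
  -- starts = data.get('round_start_frames') or []  (None and [] both give [])
  let starts := ((PySem.Dict.mk data).get? "round_start_frames").getD []
  -- clean = sorted({int(v) for v in starts ...})
  let clean := PySem.List.sorted (PySem.Set.ofList starts) (fun v => v) false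
  -- boundaries = [0]; boundaries.extend(v for v in clean if 0 < v < frame_count); boundaries.append(frame_count)
  let boundaries := [0] ++ clean.filter (fun v => decide (0 < v) && decide (v < frame_count)) ++ [frame_count]
  -- dedup while preserving order
  let uniq := boundaries.foldl
    (fun uniq v => if uniq = [] ∨ PySem.List.pyGetD uniq (-1) 0 ≠ v then uniq ++ [v] else uniq) []
  -- for idx in range(len(uniq) - 1): ...
  let intervals := (PySem.List.pyRange 0 ((uniq.length : Int) - 1) 1).foldl
    (fun intervals idx =>
      let start_f := PySem.List.pyGetD uniq idx 0
      let end_f := PySem.List.pyGetD uniq (idx + 1) 0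
      if end_f ≤ start_f then intervals
      else intervals ++ [(((intervals.length : Int) + 1), start_f, end_f)]) []
  if intervals = [] then [(1, 0, frame_count)] else intervals

-- ===== PORT B =====
def build_round_intervals_py_alt (data : List (String × List Int)) (frame_count : Int) : List (Int × Int × Int) :=
  let starts := ((PySem.Dict.mk data).get? "round_start_frames").getD []
  let clean := PySem.List.sorted (PySem.Set.ofList starts) (fun v => v) false
  -- single accumulating pass: state = (intervals, prev)
  let res := clean.foldl
    (fun (acc : List (Int × Int × Int) × Int) v =>
      if 0 < v ∧ v < frame_count then
        (acc.1 ++ [(((acc.1.length : Int) + 1), acc.2, v)], v)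
      else acc) ([], 0)
  let intervals :=
    if frame_count > res.2 then res.1 ++ [(((res.1.length : Int) + 1), res.2, frame_count)] else res.1
  if intervals = [] then [(1, 0, frame_count)] else intervals

-- ===== PRECONDITION & SPEC =====
def Spec_build_round_intervals_py (data : List (String × List Int)) (frame_count : Int) (out : List (Int × Int × Int)) : Prop := out = build_round_intervals_py_alt data frame_count
instance (data : List (String × List Int)) (frame_count : Int) (out : List (Int × Int × Int)) : Decidable (Spec_build_round_intervals_py data frame_count out) := by unfold Spec_build_round_intervals_py; infer_instance

-- ===== CLAIM (what is proved, stated in full; the proofs are below) =====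
def Claim_equal_build_round_intervals_py : Prop := ∀ (data : List (String × List Int)) (frame_count : Int), Dom_build_round_intervals_py data frame_count → Spec_build_round_intervals_py data frame_count (build_round_intervals_py data frame_count)

-- ===== LEMMAS AND PROOFS =====

-- the common interval shape: consecutive pairs with a 1-based running counter
def mkIv (n : Nat) (prev : Int) : List Int → List (Int × Int × Int)
  | [] => []
  | x :: xs => (((n : Int) + 1), prev, x) :: mkIv (n + 1) x xs

theorem mkIv_length (n : Nat) (prev : Int) (xs : List Int) :
    (mkIv n prev xs).length = xs.length := by
  induction xs generalizing n prev with
  | nil => rfl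
  | cons x xs ih => simp [mkIv, ih]

theorem mkIv_append_singleton (n : Nat) (prev f : Int) (xs : List Int) :
    mkIv n prev (xs ++ [f]) = mkIv n prev xs ++ [(((n + xs.length : Nat) : Int) + 1, xs.getLastD prev, f)] := by
  induction xs generalizing n prev with
  | nil => simp [mkIv]
  | cons x xs ih =>
      have hn : (((n + 1) + xs.length : Nat) : Int) = ((n + (x :: xs).length : Nat) : Int) := by
        push_cast; simp; ring
      simp only [List.cons_append, mkIv, ih (n + 1) x, List.getLastD_cons, hn]

-- A's dedup fold is the identity on a strictly increasing boundary list
theorem dedup_fold (xs : List Int) :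
    ∀ (acc : List Int) (b : Int), acc ≠ [] → PySem.List.pyGetD acc (-1) 0 = b →
      List.IsChain (· < ·) (b :: xs) →
      xs.foldl (fun (uniq : List Int) v =>
        if uniq = [] ∨ PySem.List.pyGetD uniq (-1) 0 ≠ v then uniq ++ [v] else uniq) acc
      = acc ++ xs := by
  induction xs with
  | nil => intro acc b _ _ _; simp
  | cons x xs ih =>
      intro acc b hacc hb hch
      rcases List.isChain_cons_cons.mp hch with ⟨hlt, hch'⟩
      have hne : PySem.List.pyGetD acc (-1) 0 ≠ x := by rw [hb]; omega
      simp only [List.foldl_cons, if_pos (Or.inr hne)]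
      rw [ih (acc ++ [x]) x (by simp)
        (PySem.List.pyGetD_neg_one_append_singleton acc x 0) hch']
      simp

-- A's index-based pairwise loop over a strictly increasing list (prev :: rest) builds mkIv
theorem pairs_fold_key (rest : List Int) :
    ∀ (prev : Int) (acc : List (Int × Int × Int)),
      List.IsChain (· < ·) (prev :: rest) →
      (List.range rest.length).foldl
        (fun (intervals : List (Int × Int × Int)) (k : Nat) =>
          if (prev :: rest).getD (k + 1) 0 ≤ (prev :: rest).getD k 0 then intervals
          else intervals ++ [(((intervals.length : Int) + 1), (prev :: rest).getD k 0,
                              (prev :: rest).getD (k + 1) 0)]) acc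
      = acc ++ mkIv acc.length prev rest := by
  induction rest with
  | nil => intro prev acc _; simp [mkIv]
  | cons b t ih =>
      intro prev acc hch
      rcases List.isChain_cons_cons.mp hch with ⟨hlt, hch'⟩
      have hshift : (List.range (b :: t).length) = 0 :: (List.range t.length).map (· + 1) := by
        simp [List.range_succ_eq_map]
      rw [hshift]
      simp only [List.foldl_cons, List.foldl_map]
      have h0 : (if (prev :: b :: t).getD (0 + 1) 0 ≤ (prev :: b :: t).getD 0 0 then acc
            else acc ++ [(((acc.length : Int) + 1), (prev :: b :: t).getD 0 0,
                          (prev :: b :: t).getD (0 + 1) 0)])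
          = acc ++ [(((acc.length : Int) + 1), prev, b)] := by
        simp only [List.getD_cons_succ, List.getD_cons_zero]
        rw [if_neg (by omega)]
      rw [h0]
      have hcongr : ∀ (intervals : List (Int × Int × Int)) (k : Nat), k ∈ List.range t.length →
          (if (prev :: b :: t).getD (k + 1 + 1) 0 ≤ (prev :: b :: t).getD (k + 1) 0 then intervals
           else intervals ++ [(((intervals.length : Int) + 1), (prev :: b :: t).getD (k + 1) 0,
                               (prev :: b :: t).getD (k + 1 + 1) 0)])
          = (if (b :: t).getD (k + 1) 0 ≤ (b :: t).getD k 0 then intervals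
             else intervals ++ [(((intervals.length : Int) + 1), (b :: t).getD k 0,
                                 (b :: t).getD (k + 1) 0)]) := by
        intro intervals k _
        simp only [List.getD_cons_succ]
      refine Eq.trans (PySem.List.foldl_congr_mem _ _ _ _ hcongr) ?_
      rw [ih b (acc ++ [(((acc.length : Int) + 1), prev, b)]) hch']
      simp [mkIv]

-- B's filtered fold, in closed form
theorem b_fold (c : List Int) (fc : Int) :
    ∀ (acc : List (Int × Int × Int)) (prev : Int),
      c.foldl (fun (acc : List (Int × Int × Int) × Int) v =>
        if 0 < v ∧ v < fc then (acc.1 ++ [(((acc.1.length : Int) + 1), acc.2, v)], v) else acc)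
        (acc, prev)
      = (acc ++ mkIv acc.length prev (c.filter (fun v => decide (0 < v) && decide (v < fc))),
         (c.filter (fun v => decide (0 < v) && decide (v < fc))).getLastD prev) := by
  induction c with
  | nil => intro acc prev; simp [mkIv]
  | cons x xs ih =>
      intro acc prev
      by_cases hx : 0 < x ∧ x < fc
      · simp only [List.foldl_cons, if_pos hx, List.filter_cons,
          decide_eq_true hx.1, decide_eq_true hx.2, Bool.and_self, if_pos trivial]
        rw [ih]
        simp only [mkIv, List.getLastD_cons, List.length_append, List.length_cons,
          List.length_nil, List.append_assoc, List.cons_append, List.nil_append, Nat.zero_add]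
      · have hf : (decide (0 < x) && decide (x < fc)) = false := by
          rcases not_and_or.mp hx with h | h <;> simp [h]
        simp only [List.foldl_cons, if_neg hx, List.filter_cons, hf]
        rw [ih]
        simp

-- ===== VERDICT (by name: the statement is the Claim_ definition above) =====
theorem build_round_intervals_py_spec : Claim_equal_build_round_intervals_py := by
  intro data fc _
  unfold Spec_build_round_intervals_py build_round_intervals_py build_round_intervals_py_alt
  simp only []
  set starts := ((PySem.Dict.mk data).get? "round_start_frames").getD [] with hstarts
  set clean := PySem.List.sorted (PySem.Set.ofList starts) (fun v => v) false with hclean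
  have hpw : clean.Pairwise (· < ·) := PySem.List.sorted_ofList_pairwise_lt starts
  set L := clean.filter (fun v => decide (0 < v) && decide (v < fc)) with hL
  have hmem : ∀ v ∈ L, 0 < v ∧ v < fc := by
    intro v hv
    have := List.of_mem_filter hv
    simp at this; exact this
  have hLpw : L.Pairwise (· < ·) := hpw.filter _
  rw [b_fold clean fc [] 0]
  by_cases hfc : 0 < fc
  · -- boundaries strictly increasing; dedup is identity; all pairs kept
    have hbpw : List.Pairwise (· < ·) (0 :: (L ++ [fc])) := by
      constructor
      · intro v hv
        rcases List.mem_append.mp hv with h | h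
        · exact (hmem v h).1
        · simp at h; omega
      · rw [List.pairwise_append]
        refine ⟨hLpw, by simp, ?_⟩
        intro v hv y hy
        simp at hy; subst hy
        exact (hmem v hv).2
    have hch : List.IsChain (· < ·) (0 :: (L ++ [fc])) := hbpw.isChain
    have huniq : ([0] ++ L ++ [fc]).foldl
        (fun (uniq : List Int) v =>
          if uniq = [] ∨ PySem.List.pyGetD uniq (-1) 0 ≠ v then uniq ++ [v] else uniq) []
        = 0 :: (L ++ [fc]) := by
      have : ([0] ++ L ++ [fc]) = 0 :: (L ++ [fc]) := by simp
      rw [this]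
      have hinit : (if ([] : List Int) = [] ∨ PySem.List.pyGetD ([] : List Int) (-1) 0 ≠ 0
            then ([] : List Int) ++ [0] else ([] : List Int)) = [0] := by simp
      rw [List.foldl_cons, hinit]
      rw [dedup_fold (L ++ [fc]) [0] 0 (by simp)
        (PySem.List.pyGetD_neg_one_append_singleton [] 0 0) hch]
      simp
    rw [huniq]
    have hlen : (((0 :: (L ++ [fc])).length : Int)) - 1 = ((L ++ [fc]).length : Nat) := by
      simp
    rw [hlen, PySem.List.pyRange_zero_nat]
    simp only [List.foldl_map]
    have hfold := pairs_fold_key (L ++ [fc]) 0 [] hch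
    have hcongr2 : (List.range (L ++ [fc]).length).foldl
          (fun (intervals : List (Int × Int × Int)) (k : Nat) =>
            if PySem.List.pyGetD (0 :: (L ++ [fc])) ((k : Int) + 1) 0 ≤
                PySem.List.pyGetD (0 :: (L ++ [fc])) (k : Int) 0 then intervals
            else intervals ++ [(((intervals.length : Int) + 1),
                PySem.List.pyGetD (0 :: (L ++ [fc])) (k : Int) 0,
                PySem.List.pyGetD (0 :: (L ++ [fc])) ((k : Int) + 1) 0)]) []
        = (List.range (L ++ [fc]).length).foldl
          (fun (intervals : List (Int × Int × Int)) (k : Nat) =>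
            if (0 :: (L ++ [fc])).getD (k + 1) 0 ≤ (0 :: (L ++ [fc])).getD k 0 then intervals
            else intervals ++ [(((intervals.length : Int) + 1), (0 :: (L ++ [fc])).getD k 0,
                                (0 :: (L ++ [fc])).getD (k + 1) 0)]) [] := by
      apply PySem.List.foldl_congr_mem
      intro intervals k _
      have h1 : ((k : Int) + 1) = (((k + 1 : Nat) : Int)) := by push_cast; ring
      rw [h1, PySem.List.pyGetD_natCast, PySem.List.pyGetD_natCast]
    rw [hcongr2, hfold]
    simp only [List.nil_append, List.length_nil]
    have hne : mkIv 0 0 (L ++ [fc]) ≠ [] := by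
      intro h
      have := mkIv_length 0 0 (L ++ [fc])
      rw [h] at this; simp at this
    rw [if_neg (by simpa using hne)]
    have hlast : fc > L.getLastD 0 := by
      rcases List.eq_nil_or_concat L with h | ⟨ys, y, h⟩
      · simp [h]; omega
      · rw [h, List.concat_eq_append, List.getLastD_concat]
        exact (hmem y (by simp [h])).2
    rw [if_pos hlast, mkIv_append_singleton 0 0 fc L]
    have hne2 : mkIv 0 0 L ++ [((((0 + L.length : Nat)) : Int) + 1, L.getLastD 0, fc)] ≠ [] := by simp
    rw [if_neg (by simpa [mkIv_length] using hne2)]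
    simp only [mkIv_length, List.nil_append, List.length_nil, Nat.zero_add]
    rfl
  · -- frame_count ≤ 0: both sides fall back to [(1, 0, frame_count)]
    push_neg at hfc
    have hLnil : L = [] := by
      rw [hL, List.filter_eq_nil_iff]
      intro v hv
      simp only [Bool.and_eq_true, decide_eq_true_eq, not_and]
      intro h0; omega
    have hFnil : clean.filter (fun v => decide (0 < v) && decide (v < fc)) = [] := by
      rw [← hL]; exact hLnil
    rw [hLnil, hFnil]
    simp only [List.append_nil, List.nil_append, mkIv, List.getLastD_nil]
    by_cases h0 : fc = 0
    · subst h0; decide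
    · have happ : ([0] ++ [fc] : List Int) = [0, fc] := by simp
      rw [happ]
      have hinit : (if ([] : List Int) = [] ∨ PySem.List.pyGetD ([] : List Int) (-1) 0 ≠ 0
            then ([] : List Int) ++ [0] else ([] : List Int)) = [0] := by simp
      have hstep2 : (if ([0] : List Int) = [] ∨ PySem.List.pyGetD ([0] : List Int) (-1) 0 ≠ fc
            then ([0] : List Int) ++ [fc] else ([0] : List Int)) = [0, fc] := by
        rw [if_pos (Or.inr (by
          have h : PySem.List.pyGetD ([0] : List Int) (-1) 0 = 0 :=
            PySem.List.pyGetD_neg_one_append_singleton [] 0 0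
          rw [h]; omega))]
        simp
      rw [List.foldl_cons, hinit, List.foldl_cons, hstep2, List.foldl_nil]
      have hl : ((([0, fc] : List Int).length : Int)) - 1 = ((1 : Nat) : Int) := by simp
      rw [hl, PySem.List.pyRange_zero_nat]
      simp only [List.range_one, List.map_cons, List.map_nil, List.foldl_cons, List.foldl_nil]
      rw [if_pos (by
        rw [show ((0 : Nat) : Int) + 1 = ((1 : Nat) : Int) by simp,
          PySem.List.pyGetD_natCast, PySem.List.pyGetD_natCast]
        simp
        omega)]
      have hgt : ¬ fc > 0 := by omega
      simp [hgt]
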